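-- pv_equiv track=rewrite | github.com/ajb333111/CSE465 | HW5/access.py | compute_spot
-- ===== SOURCE A (Python) =====
-- def compute_spot(N, nonZeroNums, row, col):
--     """
--     Helper method that computes the index for the element using a matrix flipped over the diagonal
--     """
--     size = N
--     permaNonZeroNums = nonZeroNums
--     #checks for correct row
--     while N-1 != row:
--         nonZeroNums = nonZeroNums - N
--         N -= 1
--
--     result = nonZeroNums - (row - col)
--
--     return permaNonZeroNums - result
-- ===== SOURCE B (Python) =====
-- def compute_spot(N, nonZeroNums, row, col):
--     """Closed form: the loop subtracts N, N-1, ..., row+2 from nonZeroNums,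
--     i.e. the arithmetic series sum (N+row+2)*(N-1-row)//2. Requires row <= N-1."""
--     return (N + row + 2) * (N - 1 - row) // 2 + (row - col)
-- ===== Notes on version B (the rewrite author's own statement) =====
-- stated objective: faster
-- what changed: Replaced the O(N-row) decrement loop by the closed-form arithmetic-series sum (N+row+2)*(N-1-row)//2, noting the result does not depend on nonZeroNums.
import Mathlib
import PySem

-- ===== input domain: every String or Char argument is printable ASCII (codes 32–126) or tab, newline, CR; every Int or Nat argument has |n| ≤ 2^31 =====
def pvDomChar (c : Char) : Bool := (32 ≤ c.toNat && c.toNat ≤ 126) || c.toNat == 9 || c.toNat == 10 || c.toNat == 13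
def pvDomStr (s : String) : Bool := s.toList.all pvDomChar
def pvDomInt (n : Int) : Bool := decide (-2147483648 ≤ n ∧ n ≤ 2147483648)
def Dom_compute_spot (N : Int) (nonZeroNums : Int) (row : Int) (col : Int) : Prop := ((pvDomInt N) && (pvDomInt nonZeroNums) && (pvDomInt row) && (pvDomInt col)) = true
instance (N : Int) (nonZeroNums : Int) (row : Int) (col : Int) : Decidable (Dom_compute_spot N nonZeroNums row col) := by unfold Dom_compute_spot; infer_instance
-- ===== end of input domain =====

-- B replaces A's O(N-row) decrement loop by the closed-form arithmetic-series sum (faster, asymptotic).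


-- ===== PORT A =====
-- the while loop; the 'row < N - 1' guard only makes the function total where
-- Python's 'N-1 != row' loop diverges (row > N-1, excluded by Pre_)
def compute_spot_loop (N : Int) (nonZeroNums : Int) (row : Int) : Int × Int :=
  if row < N - 1 then compute_spot_loop (N - 1) (nonZeroNums - N) row
  else (N, nonZeroNums)
termination_by (N - 1 - row).toNat
decreasing_by omega

def compute_spot (N : Int) (nonZeroNums : Int) (row : Int) (col : Int) : Int :=
  let permaNonZeroNums := nonZeroNums
  let p := compute_spot_loop N nonZeroNums row
  let result := p.2 - (row - col)
  permaNonZeroNums - result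

-- ===== PORT B =====
def compute_spot_alt (N : Int) (nonZeroNums : Int) (row : Int) (col : Int) : Int :=
  PySem.Int.floordiv ((N + row + 2) * (N - 1 - row)) 2 + (row - col)

-- ===== PRECONDITION & SPEC =====
-- Pre_ excludes row > N-1, where Python A's while loop never terminates (diverges).
def Pre_compute_spot (N : Int) (nonZeroNums : Int) (row : Int) (col : Int) : Prop := row ≤ N - 1
instance (N : Int) (nonZeroNums : Int) (row : Int) (col : Int) : Decidable (Pre_compute_spot N nonZeroNums row col) := by unfold Pre_compute_spot; infer_instance
def pvWitness_compute_spot : Int × Int × Int × Int := (3, 5, 1, 0)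

def Spec_compute_spot (N : Int) (nonZeroNums : Int) (row : Int) (col : Int) (out : Int) : Prop := out = compute_spot_alt N nonZeroNums row col
instance (N : Int) (nonZeroNums : Int) (row : Int) (col : Int) (out : Int) : Decidable (Spec_compute_spot N nonZeroNums row col out) := by unfold Spec_compute_spot; infer_instance

-- ===== CLAIM (what is proved, stated in full; the proofs are below) =====
def Claim_equal_compute_spot : Prop := ∀ (N : Int) (nonZeroNums : Int) (row : Int) (col : Int), Dom_compute_spot N nonZeroNums row col → Pre_compute_spot N nonZeroNums row col → Spec_compute_spot N nonZeroNums row col (compute_spot N nonZeroNums row col)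

-- ===== LEMMAS AND PROOFS =====
-- loop invariant: doubling avoids division; the loop subtracts the series N + (N-1) + … + (row+2)
theorem compute_spot_loop_snd (k : Nat) : ∀ (N nz row : Int), N - 1 - row = (k : Int) →
    2 * (compute_spot_loop N nz row).2 = 2 * nz - (N + row + 2) * (N - 1 - row) := by
  induction k with
  | zero =>
    intro N nz row h
    rw [compute_spot_loop]
    have : ¬ row < N - 1 := by omega
    simp [this]
    have h0 : N - 1 - row = 0 := by exact_mod_cast h
    rw [h0]; ring
  | succ k ih =>
    intro N nz row h
    rw [compute_spot_loop]
    have hlt : row < N - 1 := by push_cast at h; omega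
    simp only [hlt, if_true]
    have h' : (N - 1) - 1 - row = (k : Int) := by push_cast at h ⊢; omega
    have := ih (N - 1) (nz - N) row h'
    have hrow : row = N - 2 - (k : Int) := by push_cast at h; omega
    rw [hrow] at this ⊢
    linear_combination this

theorem compute_spot_spec : Claim_equal_compute_spot := by
  intro N nz row col _ hpre
  unfold Pre_compute_spot at hpre
  set x := (compute_spot_loop N nz row).2 with hx
  have hk : N - 1 - row = ((N - 1 - row).toNat : Int) := by omega
  have h2 : 2 * x = 2 * nz - (N + row + 2) * (N - 1 - row) :=
    compute_spot_loop_snd (N - 1 - row).toNat N nz row hk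
  have hP : (N + row + 2) * (N - 1 - row) = 2 * (nz - x) := by linarith
  unfold Spec_compute_spot compute_spot compute_spot_alt
  rw [hP, PySem.Int.floordiv_eq_ediv_of_pos (by norm_num), Int.mul_ediv_cancel_left _ (by norm_num)]
  simp only [← hx]
  ring
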